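-- pv_equiv track=rewrite | github.com/mxmaslin/test-tasks | max_ones/max_ones.py | max_ones
-- ===== SOURCE A (Python) =====
-- def max_ones(int_list):
--     str_list = ''.join(map(str, int_list)).split('0')
--     if len(int_list) < 3 or len(str_list) == 1:
--         return sum(int_list)
--     calculated_max_ones = 0
--     for i in range(0, len(str_list) - 1):
--         first, second = str_list[i], str_list[i + 1]
--         first = len(first) if first else 0
--         second = len(second) if second else 0
--         pair_sum = first + second
--         if pair_sum > calculated_max_ones:
--             calculated_max_ones = pair_sum
--     return calculated_max_ones
-- ===== SOURCE B (Python) =====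
-- def max_ones(int_list):
--     s = ''.join(map(str, int_list))
--     if len(int_list) < 3 or '0' not in s:
--         return sum(int_list)
--     best = 0
--     prev = None
--     cur = 0
--     for ch in s:
--         if ch == '0':
--             if prev is not None:
--                 best = max(best, prev + cur)
--             prev = cur
--             cur = 0
--         else:
--             cur += 1
--     if prev is not None:
--         best = max(best, prev + cur)
--     return best
-- ===== Notes on version B (the rewrite author's own statement) =====
-- stated objective: simpler
-- what changed: B replaces A's split('0')-then-indexed-adjacent-pair loop with a single character scan that keeps the current and previous run lengths and updates the running maximum at each '0', testing '0' in s instead of counting split pieces.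
import Mathlib
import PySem

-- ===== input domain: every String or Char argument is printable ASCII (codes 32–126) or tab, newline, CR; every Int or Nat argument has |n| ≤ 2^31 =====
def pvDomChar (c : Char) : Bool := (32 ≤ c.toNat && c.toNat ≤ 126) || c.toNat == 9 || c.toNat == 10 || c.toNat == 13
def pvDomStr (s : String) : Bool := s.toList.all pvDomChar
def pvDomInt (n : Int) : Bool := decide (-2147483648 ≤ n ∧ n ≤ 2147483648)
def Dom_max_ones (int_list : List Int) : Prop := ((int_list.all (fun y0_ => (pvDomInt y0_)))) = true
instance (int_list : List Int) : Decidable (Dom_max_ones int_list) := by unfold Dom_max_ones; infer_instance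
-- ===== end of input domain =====

-- B is a single character scan over the joined digit string (current/previous run lengths,
-- running maximum) instead of A's split('0') followed by an indexed loop over adjacent pieces;
-- same cost, simpler bookkeeping.

-- ===== PORT A =====
def max_ones (int_list : List Int) : Int :=
  let str_list := PySem.Chars.splitOn (PySem.Chars.join [] (int_list.map PySem.Int.toChars)) ['0']
  if decide ((int_list.length : Int) < 3) || (str_list.length == 1) then
    int_list.sum
  else
    (PySem.List.pyRange 0 ((str_list.length : Int) - 1) 1).foldl
      (fun calculated_max_ones i =>
        let first := PySem.List.pyGetD str_list i []
        let second := PySem.List.pyGetD str_list (i + 1) []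
        let firstN : Int := if first ≠ [] then (first.length : Int) else 0
        let secondN : Int := if second ≠ [] then (second.length : Int) else 0
        let pair_sum := firstN + secondN
        if pair_sum > calculated_max_ones then pair_sum else calculated_max_ones) 0

-- ===== PORT B =====
-- loop body of Source B's scan: state = (best, prev, cur)
def bstep (st : Int × Option Int × Int) (ch : Char) : Int × Option Int × Int :=
  if ch = '0' then
    (match st.2.1 with
     | some p => max st.1 (p + st.2.2)
     | none => st.1, some st.2.2, 0)
  else (st.1, st.2.1, st.2.2 + 1)

def max_ones_alt (int_list : List Int) : Int :=
  let s := PySem.Chars.join [] (int_list.map PySem.Int.toChars)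
  if decide ((int_list.length : Int) < 3) || !(PySem.Chars.isIn ['0'] s) then
    int_list.sum
  else
    let st := s.foldl bstep (0, none, 0)
    match st.2.1 with
    | some p => max st.1 (p + st.2.2)
    | none => st.1

-- ===== PRECONDITION & SPEC =====
def Spec_max_ones (int_list : List Int) (out : Int) : Prop := out = max_ones_alt int_list
instance (int_list : List Int) (out : Int) : Decidable (Spec_max_ones int_list out) := by unfold Spec_max_ones; infer_instance

-- ===== CLAIM (what is proved, stated in full; the proofs are below) =====
def Claim_equal_max_ones : Prop := ∀ (int_list : List Int), Dom_max_ones int_list → Spec_max_ones int_list (max_ones int_list)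

-- ===== LEMMAS AND PROOFS =====

-- structural model of s.split('0') on the char level
def split0 : List Char → List (List Char)
  | [] => [[]]
  | c :: rest =>
      if c = '0' then [] :: split0 rest
      else
        match split0 rest with
        | [] => [[c]]
        | h :: t => (c :: h) :: t

-- lengths of the pieces, as Ints
def segs (cs : List Char) : List Int := (split0 cs).map (fun l => (l.length : Int))

-- add c to the head element of a length list
def consAdd (c : Int) : List Int → List Int
  | [] => [c]
  | h :: t => (c + h) :: t

-- running maximum over sums of adjacent elements
def pairFold : Int → List Int → Int
  | acc, [] => acc
  | acc, [_] => acc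
  | acc, x :: y :: rest => pairFold (max acc (x + y)) (y :: rest)

-- prepend x to the first piece
def consHead (x : List Char) : List (List Char) → List (List Char)
  | [] => [x]
  | h :: t => (x ++ h) :: t

theorem split0_ne_nil (cs : List Char) : split0 cs ≠ [] := by
  cases cs with
  | nil => simp [split0]
  | cons c rest =>
      simp only [split0]
      split_ifs
      · simp
      · cases split0 rest <;> simp

theorem segs_ne_nil (cs : List Char) : segs cs ≠ [] := by
  simp [segs, split0_ne_nil]

theorem go_spec : ∀ (fuel : Nat) (l cur : List Char) (acc : List (List Char)),
    l.length ≤ fuel →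
    PySem.Chars.splitOn.go ['0'] fuel l cur acc = acc.reverse ++ consHead cur.reverse (split0 l) := by
  intro fuel
  induction fuel with
  | zero =>
      intro l cur acc h
      have : l = [] := by cases l <;> simp_all
      subst this
      simp [PySem.Chars.splitOn.go, split0, consHead]
  | succ f ih =>
      intro l cur acc h
      cases l with
      | nil => simp [PySem.Chars.splitOn.go, split0, consHead]
      | cons c rest =>
          by_cases hc : c = '0'
          · subst hc
            rw [PySem.Chars.splitOn.go]
            rw [if_pos (by simp [List.isPrefixOf])]
            simp only [List.length_singleton, List.drop_one, List.tail_cons]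
            rw [ih rest [] _ (by simp at h; omega)]
            simp only [split0, List.reverse_cons, List.append_assoc,
              List.reverse_nil, List.singleton_append]
            cases h0 : split0 rest with
            | nil => exact absurd h0 (split0_ne_nil rest)
            | cons sh st => simp [consHead]
          · rw [PySem.Chars.splitOn.go]
            rw [if_neg (by simp [List.isPrefixOf]; exact fun h' => hc h'.symm)]
            rw [ih rest (c :: cur) acc (by simp at h; omega)]
            simp only [split0, if_neg hc]
            cases h0 : split0 rest with
            | nil => exact absurd h0 (split0_ne_nil rest)
            | cons sh st => simp [consHead]

theorem splitOn_eq_split0 (s : List Char) : PySem.Chars.splitOn s ['0'] = split0 s := by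
  rw [PySem.Chars.splitOn, go_spec (s.length + 1) s [] [] (by omega)]
  cases h0 : split0 s with
  | nil => exact absurd h0 (split0_ne_nil s)
  | cons h t => simp [consHead]

theorem split0_length (cs : List Char) : (split0 cs).length = cs.count '0' + 1 := by
  induction cs with
  | nil => simp [split0]
  | cons c rest ih =>
      simp only [split0]
      by_cases hc : c = '0'
      · subst hc; simp [ih]
      · rw [if_neg hc]
        cases h0 : split0 rest with
        | nil => exact absurd h0 (split0_ne_nil rest)
        | cons sh st =>
            simp only [List.length_cons]
            rw [h0] at ih
            simp at ih
            simp [hc, ih]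

-- the guard '0' not in s ↔ len(split) == 1
theorem guard_iff (s : List Char) :
    ((split0 s).length == 1) = !(PySem.Chars.isIn ['0'] s) := by
  by_cases h : '0' ∈ s
  · have : PySem.Chars.isIn ['0'] s = true :=
      (PySem.Chars.isIn_iff_infix ['0'] s).mpr ((List.singleton_infix_iff '0' s).mpr h)
    rw [this]
    have : s.count '0' ≠ 0 := by
      simp [List.count_eq_zero]
      exact h
    simp [split0_length]
    omega
  · have : PySem.Chars.isIn ['0'] s = false := by
      rw [PySem.Chars.isIn_eq_false_iff]
      rw [List.singleton_infix_iff]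
      exact h
    rw [this]
    have : s.count '0' = 0 := by rwa [List.count_eq_zero]
    simp [split0_length, this]

-- ===== B side: the scan equals pairFold over the piece lengths =====

def bfinish (st : Int × Option Int × Int) : Int :=
  match st.2.1 with
  | some p => max st.1 (p + st.2.2)
  | none => st.1

theorem scan_some : ∀ (cs : List Char) (best p cur : Int),
    bfinish (cs.foldl bstep (best, some p, cur))
      = pairFold best (p :: consAdd cur (segs cs)) := by
  intro cs
  induction cs with
  | nil =>
      intro best p cur
      simp [segs, split0, consAdd, pairFold, bfinish]
  | cons c rest ih =>
      intro best p cur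
      by_cases hc : c = '0'
      · subst hc
        simp only [List.foldl_cons, bstep, reduceIte]
        rw [ih]
        have hs : segs ('0' :: rest) = 0 :: segs rest := by simp [segs, split0]
        rw [hs]
        cases h0 : segs rest with
        | nil => exact absurd h0 (segs_ne_nil rest)
        | cons sh st => simp [consAdd, pairFold]
      · simp only [List.foldl_cons, bstep, if_neg hc]
        rw [ih]
        have hs : ∃ sh st, segs rest = sh :: st ∧ segs (c :: rest) = (sh + 1) :: st := by
          cases h0 : split0 rest with
          | nil => exact absurd h0 (split0_ne_nil rest)
          | cons h t =>
              refine ⟨h.length, t.map (fun l => (l.length : Int)), by simp [segs, h0], ?_⟩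
              simp [segs, split0, if_neg hc, h0]
        obtain ⟨sh, st, h1, h2⟩ := hs
        rw [h1, h2]
        simp only [consAdd]
        have h3 : cur + 1 + sh = cur + (sh + 1) := by ring
        rw [h3]

theorem scan_none : ∀ (cs : List Char) (cur : Int),
    bfinish (cs.foldl bstep (0, none, cur))
      = pairFold 0 (consAdd cur (segs cs)) := by
  intro cs
  induction cs with
  | nil =>
      intro cur
      simp [segs, split0, consAdd, pairFold, bfinish]
  | cons c rest ih =>
      intro cur
      by_cases hc : c = '0'
      · subst hc
        simp only [List.foldl_cons, bstep, reduceIte]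
        rw [scan_some]
        have hs : segs ('0' :: rest) = 0 :: segs rest := by simp [segs, split0]
        rw [hs]
        cases h0 : segs rest with
        | nil => exact absurd h0 (segs_ne_nil rest)
        | cons sh st => simp [consAdd]
      · simp only [List.foldl_cons, bstep, if_neg hc]
        rw [ih]
        have hs : ∃ sh st, segs rest = sh :: st ∧ segs (c :: rest) = (sh + 1) :: st := by
          cases h0 : split0 rest with
          | nil => exact absurd h0 (split0_ne_nil rest)
          | cons h t =>
              refine ⟨h.length, t.map (fun l => (l.length : Int)), by simp [segs, h0], ?_⟩
              simp [segs, split0, if_neg hc, h0]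
        obtain ⟨sh, st, h1, h2⟩ := hs
        rw [h1, h2]
        simp only [consAdd]
        have h3 : cur + 1 + sh = cur + (sh + 1) := by ring
        rw [h3]

-- ===== A side: the indexed adjacent-pair loop equals pairFold =====

theorem rangePairs : ∀ (M : List Int) (acc : Int),
    (List.range (M.length - 1)).foldl (fun a k => max a (M.getD k 0 + M.getD (k + 1) 0)) acc
      = pairFold acc M := by
  intro M
  induction M with
  | nil => intro acc; simp [pairFold]
  | cons x L ih =>
      intro acc
      cases L with
      | nil => simp [pairFold]
      | cons y rest =>
          have hlen : (x :: y :: rest).length - 1 = (y :: rest).length - 1 + 1 := by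
            simp
          rw [hlen, List.range_succ_eq_map, List.foldl_cons, List.foldl_map]
          simp only [Nat.succ_eq_add_one, List.getD_cons_succ, List.getD_cons_zero]
          have ih' := ih (max acc (x + y))
          simp only [List.getD_cons_succ] at ih'
          rw [ih']
          rfl

theorem max_ones_spec_aux (int_list : List Int) : max_ones int_list = max_ones_alt int_list := by
  simp only [max_ones, max_ones_alt]
  rw [splitOn_eq_split0, guard_iff]
  by_cases hg : (decide ((int_list.length : Int) < 3) || !(PySem.Chars.isIn ['0'] (PySem.Chars.join [] (int_list.map PySem.Int.toChars)))) = true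
  · simp only [hg, if_pos]
  · simp only [hg, if_neg, Bool.not_eq_true]
    set s := PySem.Chars.join [] (int_list.map PySem.Int.toChars) with hs
    -- B side
    have hb : (let st := s.foldl bstep (0, none, 0)
               match st.2.1 with
               | some p => max st.1 (p + st.2.2)
               | none => st.1) = pairFold 0 (segs s) := by
      show bfinish (s.foldl bstep (0, none, 0)) = _
      rw [scan_none]
      cases h0 : segs s with
      | nil => exact absurd h0 (segs_ne_nil s)
      | cons sh st => simp [consAdd]
    rw [hb]
    -- A side
    have hlen1 : ∀ (l : List Char), (if l ≠ [] then (l.length : Int) else 0) = (l.length : Int) := by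
      intro l; split_ifs with h <;> simp_all
    simp only [hlen1]
    have hnat : ((split0 s).length : Int) - 1 = (((split0 s).length - 1 : Nat) : Int) := by
      have := split0_ne_nil s
      have : (split0 s).length ≠ 0 := by simpa [List.length_eq_zero_iff]
      omega
    rw [hnat, PySem.List.pyRange_zero_natCast, List.foldl_map]
    have hcongr : ∀ (a : Int), ∀ k ∈ List.range ((split0 s).length - 1),
        (fun (calculated_max_ones : Int) (i : Int) =>
          let first := PySem.List.pyGetD (split0 s) i []
          let second := PySem.List.pyGetD (split0 s) (i + 1) []
          let pair_sum := (first.length : Int) + (second.length : Int)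
          if pair_sum > calculated_max_ones then pair_sum else calculated_max_ones) a (↑k)
        = max a ((segs s).getD k 0 + (segs s).getD (k + 1) 0) := by
      intro a k hk
      simp only [List.mem_range] at hk
      have h1 : PySem.List.pyGetD (split0 s) (↑k) [] = (split0 s).getD k [] :=
        PySem.List.pyGetD_natCast _ _ _
      have h2 : PySem.List.pyGetD (split0 s) ((↑k : Int) + 1) [] = (split0 s).getD (k + 1) [] := by
        rw [show ((↑k : Int) + 1) = ((k + 1 : Nat) : Int) by push_cast; ring]
        exact PySem.List.pyGetD_natCast _ _ _
      simp only [h1, h2]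
      have hg1 : ((((split0 s).getD k []).length : Int)) = (segs s).getD k 0 := by
        have hk' : k < (split0 s).length := by omega
        simp [segs, hk']
      have hg2 : ((((split0 s).getD (k + 1) []).length : Int)) = (segs s).getD (k + 1) 0 := by
        have hk' : k + 1 < (split0 s).length := by omega
        simp [segs, hk']
      rw [hg1, hg2]
      by_cases h : (segs s).getD k 0 + (segs s).getD (k + 1) 0 > a
      · rw [if_pos h, max_eq_right (le_of_lt h)]
      · rw [if_neg h, max_eq_left (by omega)]
    rw [PySem.List.foldl_congr_mem _ _
      (fun a k => max a ((segs s).getD k 0 + (segs s).getD (k + 1) 0)) _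
      (fun a k hk => hcongr a k hk)]
    have : (split0 s).length - 1 = (segs s).length - 1 := by simp [segs]
    rw [this, rangePairs]

-- ===== VERDICT (by name: the statement is the Claim_ definition above) =====
theorem max_ones_spec : Claim_equal_max_ones := by
  intro int_list _
  unfold Spec_max_ones
  exact max_ones_spec_aux int_list
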